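-- pv_equiv track=rewrite | github.com/Ximena5745/Sistema_Indicadores_Poli | streamlit_app/pages/gestion_om.py | _extraer_tipo_y_identificador
-- ===== SOURCE A (Python) =====
-- def _extraer_tipo_y_identificador(numero_om: str) -> tuple:
--     """Extrae el tipo de acción y el identificador del campo numero_om."""
--     if not numero_om:
--         return ("Sin acción", "")
--     for tipo in ["OM Kawak", "Reto Plan Anual", "Proyecto Institucional", "Otro"]:
--         if numero_om.startswith(tipo + ":"):
--             identificador = numero_om[len(tipo) + 1:].strip()
--             return (tipo, identificador)
--     return ("Otro", numero_om)
-- ===== SOURCE B (Python) =====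
-- _PREFIJOS = {"OM Kawak", "Reto Plan Anual", "Proyecto Institucional", "Otro"}
--
-- def _extraer_tipo_y_identificador(numero_om: str) -> tuple:
--     """Parse first, then match: split once at the first ':' instead of scanning prefixes."""
--     if not numero_om:
--         return ("Sin acción", "")
--     tipo, sep, resto = numero_om.partition(":")
--     if sep == ":" and tipo in _PREFIJOS:
--         return (tipo, resto.strip())
--     return ("Otro", numero_om)
-- ===== Notes on version B (the rewrite author's own statement) =====
-- stated objective: idiomatic
-- what changed: B splits the string once at the first colon (str.partition) and checks the part before it against a set of the four known prefixes, instead of A's loop testing startswith for each prefix.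
import Mathlib
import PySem

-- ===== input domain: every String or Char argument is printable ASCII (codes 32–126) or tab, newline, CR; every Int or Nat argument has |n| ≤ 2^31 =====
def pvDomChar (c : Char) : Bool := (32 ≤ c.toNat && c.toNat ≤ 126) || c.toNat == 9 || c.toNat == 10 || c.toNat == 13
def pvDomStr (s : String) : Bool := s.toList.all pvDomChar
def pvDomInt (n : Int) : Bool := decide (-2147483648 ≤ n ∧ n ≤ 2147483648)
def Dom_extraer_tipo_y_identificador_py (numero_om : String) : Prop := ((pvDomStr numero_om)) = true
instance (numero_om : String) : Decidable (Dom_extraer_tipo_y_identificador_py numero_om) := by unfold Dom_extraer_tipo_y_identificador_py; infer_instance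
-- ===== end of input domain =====

-- B replaces A's loop of four startswith tests by one partition at the first colon plus a set membership (idiomatic; same cost).


-- ===== PORT A =====
def pvTiposA : List String := ["OM Kawak", "Reto Plan Anual", "Proyecto Institucional", "Otro"]

-- A's for-loop with early return over the fixed list of prefixes
def pvLoopA (numero_om : String) : List String → String × String
  | [] => ("Otro", numero_om)
  | tipo :: rest =>
    if PySem.Str.startswith numero_om (tipo ++ ":") then
      (tipo, PySem.Str.strip (PySem.Str.slice numero_om (some ((PySem.Str.len tipo : Int) + 1)) none))
    else pvLoopA numero_om rest

def extraer_tipo_y_identificador_py (numero_om : String) : String × String :=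
  if numero_om.toList = [] then ("Sin acción", "")
  else pvLoopA numero_om pvTiposA

-- ===== PORT B =====
def pvPrefijos : List String := PySem.Set.ofList ["OM Kawak", "Reto Plan Anual", "Proyecto Institucional", "Otro"]

-- str.partition(":") ported by hand on the char list: tipo = chars before the first ':',
-- the separator was found iff the dropWhile part is nonempty, resto = chars after it — exact for a one-char separator.
def extraer_tipo_y_identificador_py_alt (numero_om : String) : String × String :=
  if numero_om.toList = [] then ("Sin acción", "")
  else
    let tipo := numero_om.toList.takeWhile (fun c => c ≠ ':')
    let dw := numero_om.toList.dropWhile (fun c => c ≠ ':')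
    if dw ≠ [] ∧ String.ofList tipo ∈ pvPrefijos then
      (String.ofList tipo, String.ofList (PySem.Chars.strip (dw.drop 1)))
    else ("Otro", numero_om)

-- ===== PRECONDITION & SPEC =====
def Spec_extraer_tipo_y_identificador_py (numero_om : String) (out : String × String) : Prop := out = extraer_tipo_y_identificador_py_alt numero_om
instance (numero_om : String) (out : String × String) : Decidable (Spec_extraer_tipo_y_identificador_py numero_om out) := by unfold Spec_extraer_tipo_y_identificador_py; infer_instance

-- ===== CLAIM (what is proved, stated in full; the proofs are below) =====
def Claim_equal_extraer_tipo_y_identificador_py : Prop := ∀ (numero_om : String), Dom_extraer_tipo_y_identificador_py numero_om → Spec_extraer_tipo_y_identificador_py numero_om (extraer_tipo_y_identificador_py numero_om)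

-- ===== LEMMAS AND PROOFS =====

-- a colon-free block followed by ':' is exactly what takeWhile (≠ ':') picks off
theorem takeWhile_colon (a x : List Char) (ha : ':' ∉ a) :
    (a ++ ':' :: x).takeWhile (fun c => c ≠ ':') = a := by
  induction a with
  | nil => simp
  | cons c t ih =>
    simp only [List.mem_cons, not_or] at ha
    rw [List.cons_append, List.takeWhile_cons_of_pos (by simpa using Ne.symm ha.1), ih ha.2]

theorem dropWhile_colon (a x : List Char) (ha : ':' ∉ a) :
    (a ++ ':' :: x).dropWhile (fun c => c ≠ ':') = ':' :: x := by
  induction a with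
  | nil => simp
  | cons c t ih =>
    simp only [List.mem_cons, not_or] at ha
    rw [List.cons_append, List.dropWhile_cons_of_pos (by simpa using Ne.symm ha.1), ih ha.2]

-- the first element dropWhile (≠ ':') keeps is a ':'
theorem dropWhile_head_colon (l : List Char) :
    ∀ c r, l.dropWhile (fun x => x ≠ ':') = c :: r → c = ':' := by
  induction l with
  | nil => intro c r h; simp at h
  | cons a t ih =>
    intro c r h
    by_cases ha : a = ':'
    · rw [List.dropWhile_cons_of_neg (by simp [ha])] at h
      injection h with h1 _
      exact h1 ▸ ha
    · rw [List.dropWhile_cons_of_pos (by simpa using ha)] at h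
      exact ih c r h

-- startswith (t ++ ":") characterised via the partition of s at its first ':'
theorem startswith_iff (s t : String) (ht : ':' ∉ t.toList) :
    PySem.Str.startswith s (t ++ ":") = true ↔
      (s.toList.takeWhile (fun c => c ≠ ':') = t.toList ∧
       s.toList.dropWhile (fun c => c ≠ ':') ≠ []) := by
  rw [PySem.Str.startswith_eq, PySem.Chars.startswith_iff]
  have htl : (t ++ ":").toList = t.toList ++ [':'] := by
    rw [String.toList_append]; rfl
  rw [htl]
  constructor
  · rintro ⟨z, hz⟩
    have hs : s.toList = t.toList ++ ':' :: z := by rw [← hz]; simp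
    rw [hs, takeWhile_colon t.toList z ht, dropWhile_colon t.toList z ht]
    exact ⟨rfl, by simp⟩
  · rintro ⟨htw, hdw⟩
    rcases hd : s.toList.dropWhile (fun c => c ≠ ':') with _ | ⟨c, r⟩
    · exact absurd hd hdw
    · have hc := dropWhile_head_colon s.toList c r hd
      refine ⟨r, ?_⟩
      have hsplit := List.takeWhile_append_dropWhile (p := fun c => decide (c ≠ ':')) (l := s.toList)
      rw [← hsplit, htw, hd, hc]
      simp

-- when prefix t matches, A's returned pair is B's returned pair
theorem match_out (s t : String) (htw : s.toList.takeWhile (fun c => c ≠ ':') = t.toList) :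
    (t, PySem.Str.strip (PySem.Str.slice s (some ((PySem.Str.len t : Int) + 1)) none))
      = (String.ofList (s.toList.takeWhile (fun c => c ≠ ':')),
         String.ofList (PySem.Chars.strip ((s.toList.dropWhile (fun c => c ≠ ':')).drop 1))) := by
  have hdrop : s.toList.drop (t.toList.length + 1)
      = (s.toList.dropWhile (fun c => c ≠ ':')).drop 1 := by
    conv_lhs => rw [← List.takeWhile_append_dropWhile (p := fun c => decide (c ≠ ':')) (l := s.toList)]
    rw [← List.drop_drop, htw, List.drop_left]
  refine Prod.ext ?_ ?_
  · show t = String.ofList (s.toList.takeWhile (fun c => c ≠ ':'))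
    rw [htw, String.ofList_toList]
  · show PySem.Str.strip _ = String.ofList (PySem.Chars.strip _)
    refine String.toList_inj.mp ?_
    have hcast : ((PySem.Str.len t : Int) + 1) = ((t.toList.length + 1 : Nat) : Int) := by
      rw [PySem.Str.len_eq]; push_cast; ring
    rw [PySem.Str.toList_strip, String.toList_ofList, PySem.Str.toList_slice, hcast,
      PySem.Chars.slice_eq_listSlice, PySem.List.slice_from_natCast, hdrop]

-- ===== VERDICT (by name: the statement is the Claim_ definition above) =====
theorem extraer_tipo_y_identificador_py_spec : Claim_equal_extraer_tipo_y_identificador_py := by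
  intro s _
  unfold Spec_extraer_tipo_y_identificador_py extraer_tipo_y_identificador_py
    extraer_tipo_y_identificador_py_alt
  by_cases hnil : s.toList = []
  · simp [hnil]
  · simp only [hnil, if_neg, not_false_iff]
    have hfalse : ∀ t' : String, ':' ∉ t'.toList →
        ¬ (s.toList.takeWhile (fun c => c ≠ ':') = t'.toList ∧
           s.toList.dropWhile (fun c => c ≠ ':') ≠ []) →
        PySem.Str.startswith s (t' ++ ":") = false := by
      intro t' h1 h2
      rw [Bool.eq_false_iff]
      intro hc
      exact h2 ((startswith_iff s t' h1).mp hc)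
    by_cases hdw : s.toList.dropWhile (fun c => c ≠ ':') ≠ []
    · by_cases hmem : String.ofList (s.toList.takeWhile (fun c => c ≠ ':')) ∈ pvPrefijos
      · -- exactly one listed prefix matches; the loop returns it
        rw [if_pos ⟨hdw, hmem⟩]
        have hcases : String.ofList (s.toList.takeWhile (fun c => c ≠ ':')) = "OM Kawak" ∨
            String.ofList (s.toList.takeWhile (fun c => c ≠ ':')) = "Reto Plan Anual" ∨
            String.ofList (s.toList.takeWhile (fun c => c ≠ ':')) = "Proyecto Institucional" ∨
            String.ofList (s.toList.takeWhile (fun c => c ≠ ':')) = "Otro" := by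
          simpa [pvPrefijos, PySem.Set.ofList, PySem.Set.add, PySem.Set.empty] using hmem
        have htweq : ∀ t : String, String.ofList (s.toList.takeWhile (fun c => c ≠ ':')) = t →
            s.toList.takeWhile (fun c => c ≠ ':') = t.toList := by
          intro t h; rw [← h, String.toList_ofList]
        have hne : ∀ t u : String, s.toList.takeWhile (fun c => c ≠ ':') = t.toList →
            t ≠ u → ¬ (s.toList.takeWhile (fun c => c ≠ ':') = u.toList ∧
              s.toList.dropWhile (fun c => c ≠ ':') ≠ []) := by
          rintro t u h hne ⟨h2, _⟩
          exact hne (String.toList_inj.mp (h ▸ h2))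
        simp only [pvTiposA, pvLoopA]
        rcases hcases with h | h | h | h
        · rw [if_pos ((startswith_iff s _ (by decide)).mpr ⟨htweq _ h, hdw⟩)]
          exact match_out s _ (htweq _ h)
        · rw [hfalse "OM Kawak" (by decide) (hne _ _ (htweq _ h) (by decide))]
          rw [if_neg Bool.false_ne_true]
          rw [if_pos ((startswith_iff s _ (by decide)).mpr ⟨htweq _ h, hdw⟩)]
          exact match_out s _ (htweq _ h)
        · rw [hfalse "OM Kawak" (by decide) (hne _ _ (htweq _ h) (by decide)),
            hfalse "Reto Plan Anual" (by decide) (hne _ _ (htweq _ h) (by decide))]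
          rw [if_neg Bool.false_ne_true, if_neg Bool.false_ne_true]
          rw [if_pos ((startswith_iff s _ (by decide)).mpr ⟨htweq _ h, hdw⟩)]
          exact match_out s _ (htweq _ h)
        · rw [hfalse "OM Kawak" (by decide) (hne _ _ (htweq _ h) (by decide)),
            hfalse "Reto Plan Anual" (by decide) (hne _ _ (htweq _ h) (by decide)),
            hfalse "Proyecto Institucional" (by decide) (hne _ _ (htweq _ h) (by decide))]
          rw [if_neg Bool.false_ne_true, if_neg Bool.false_ne_true, if_neg Bool.false_ne_true]
          rw [if_pos ((startswith_iff s _ (by decide)).mpr ⟨htweq _ h, hdw⟩)]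
          exact match_out s _ (htweq _ h)
      · -- colon found but the part before it is not a listed prefix: loop falls through
        rw [if_neg (by rintro ⟨_, hm⟩; exact hmem hm)]
        have hnotm : ∀ u : String, u ∈ pvPrefijos →
            ¬ (s.toList.takeWhile (fun c => c ≠ ':') = u.toList ∧
               s.toList.dropWhile (fun c => c ≠ ':') ≠ []) := by
          rintro u hu ⟨h1, _⟩
          exact hmem (by rw [h1, String.ofList_toList]; exact hu)
        simp only [pvTiposA, pvLoopA]
        rw [hfalse "OM Kawak" (by decide) (hnotm _ (by decide)),
          hfalse "Reto Plan Anual" (by decide) (hnotm _ (by decide)),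
          hfalse "Proyecto Institucional" (by decide) (hnotm _ (by decide)),
          hfalse "Otro" (by decide) (hnotm _ (by decide))]
        simp
    · -- no ':' in s: every startswith fails, both return ("Otro", s)
      rw [if_neg (by rintro ⟨h1, _⟩; exact hdw h1)]
      simp only [pvTiposA, pvLoopA]
      rw [hfalse "OM Kawak" (by decide) (by rintro ⟨_, h⟩; exact hdw h),
        hfalse "Reto Plan Anual" (by decide) (by rintro ⟨_, h⟩; exact hdw h),
        hfalse "Proyecto Institucional" (by decide) (by rintro ⟨_, h⟩; exact hdw h),
        hfalse "Otro" (by decide) (by rintro ⟨_, h⟩; exact hdw h)]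
      simp
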